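-- pv_equiv track=rewrite | github.com/ls18166407597-design/nanobot | nanobot/providers/adapters.py | is_reasoning_model
-- ===== SOURCE A (Python) =====
-- def is_reasoning_model(model: str) -> bool:
--     """Check if the model has native reasoning (thinking) capabilities."""
--     m = model.lower()
--     return any(k in m for k in [
--         "r1",
--         "thinking",
--         "reasoning",
--         "o1",
--         "o3"
--     ])
-- ===== SOURCE B (Python) =====
-- KEYWORDS = ("r1", "thinking", "reasoning", "o1", "o3")
--
-- def is_reasoning_model(model: str) -> bool:
--     """Check if the model has native reasoning (thinking) capabilities."""
--     m = model.lower()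
--     for i in range(len(m)):
--         for k in KEYWORDS:
--             if m.startswith(k, i):
--                 return True
--     return False
-- ===== Notes on version B (the rewrite author's own statement) =====
-- stated objective: alternative
-- what changed: Instead of five independent substring scans ('k in m' per keyword), B makes one left-to-right pass over the lowered string and at each position checks whether any keyword starts there.
import Mathlib
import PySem

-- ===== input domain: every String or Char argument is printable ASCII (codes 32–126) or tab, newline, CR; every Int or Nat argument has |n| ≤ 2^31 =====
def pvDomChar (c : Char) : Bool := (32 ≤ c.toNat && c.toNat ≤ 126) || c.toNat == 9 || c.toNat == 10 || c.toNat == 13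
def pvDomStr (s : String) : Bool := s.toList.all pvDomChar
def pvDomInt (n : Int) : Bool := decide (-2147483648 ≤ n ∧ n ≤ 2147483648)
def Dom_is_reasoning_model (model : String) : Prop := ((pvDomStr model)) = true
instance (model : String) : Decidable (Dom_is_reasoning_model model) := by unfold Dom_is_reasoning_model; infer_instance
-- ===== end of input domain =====

-- B is an alternative single-pass scan: one traversal of the lowered string, checking at each
-- position whether any keyword starts there, instead of A's five independent substring scans.

-- ===== PORT A =====
def is_reasoning_model (model : String) : Bool :=
  let m := PySem.Str.lower model
  [("r1" : String), "thinking", "reasoning", "o1", "o3"].any (fun k => PySem.Str.isIn k m)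

-- ===== PORT B =====
-- the keyword tuple KEYWORDS, as lists of characters
def pvKws : List (List Char) :=
  [['r','1'], ['t','h','i','n','k','i','n','g'],
   ['r','e','a','s','o','n','i','n','g'], ['o','1'], ['o','3']]

-- Source B's single pass: position i of the loop corresponds to the suffix starting at i
def pvScan : List Char → Bool
  | [] => false
  | c :: rest => pvKws.any (fun k => PySem.Chars.startswith (c :: rest) k) || pvScan rest

def is_reasoning_model_alt (model : String) : Bool :=
  pvScan (PySem.Str.lower model).toList

-- ===== PRECONDITION & SPEC =====
def Spec_is_reasoning_model (model : String) (out : Bool) : Prop := out = is_reasoning_model_alt model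
instance (model : String) (out : Bool) : Decidable (Spec_is_reasoning_model model out) := by unfold Spec_is_reasoning_model; infer_instance

-- ===== CLAIM (what is proved, stated in full; the proofs are below) =====
def Claim_equal_is_reasoning_model : Prop := ∀ (model : String), Dom_is_reasoning_model model → Spec_is_reasoning_model model (is_reasoning_model model)

-- ===== LEMMAS AND PROOFS =====

-- the single pass finds exactly the keywords occurring as an infix
theorem pvScan_iff (l : List Char) : pvScan l = true ↔ ∃ k ∈ pvKws, k <:+: l := by
  induction l with
  | nil =>
      simp [pvScan, pvKws]
  | cons c rest ih =>
      simp only [pvScan, Bool.or_eq_true, List.any_eq_true,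
        PySem.Chars.startswith_iff, ih]
      constructor
      · rintro (⟨k, hk, hp⟩ | ⟨k, hk, hi⟩)
        · exact ⟨k, hk, hp.isInfix⟩
        · exact ⟨k, hk, (List.infix_cons_iff).mpr (Or.inr hi)⟩
      · rintro ⟨k, hk, hi⟩
        rcases (List.infix_cons_iff).mp hi with hp | hi'
        · exact Or.inl ⟨k, hk, hp⟩
        · exact Or.inr ⟨k, hk, hi'⟩

-- ===== VERDICT (by name: the statement is the Claim_ definition above) =====
theorem is_reasoning_model_spec : Claim_equal_is_reasoning_model := by
  intro model _
  unfold Spec_is_reasoning_model is_reasoning_model is_reasoning_model_alt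
  rw [Bool.eq_iff_iff]
  rw [pvScan_iff]
  simp only [List.any_eq_true, PySem.Str.isIn_iff_infix]
  constructor
  · rintro ⟨k, hk, hi⟩
    fin_cases hk <;> exact ⟨_, by simp [pvKws], hi⟩
  · rintro ⟨k, hk, hi⟩
    fin_cases hk
    · exact ⟨"r1", by simp, hi⟩
    · exact ⟨"thinking", by simp, hi⟩
    · exact ⟨"reasoning", by simp, hi⟩
    · exact ⟨"o1", by simp, hi⟩
    · exact ⟨"o3", by simp, hi⟩
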